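-- pv_equiv track=rewrite | github.com/valengobet/algo1-valengobet | labos/python/practica8/ejp2_2_1.py | pone_cero
-- ===== SOURCE A (Python) =====
-- def pone_cero(lista: list) -> list:
--     i = 0
--     for numero in lista:
--         if es_par(i):
--             lista[i] = 0
--             i = i + 1
--         else:
--             i = i + 1
--     return lista
--
-- def es_par(numero: int) -> bool:
--     if numero % 2 == 0:
--         return True
--     else:
--         return False
-- ===== SOURCE B (Python) =====
-- def pone_cero(lista: list) -> list:
--     lista[::2] = [0] * ((len(lista) + 1) // 2)
--     return lista
-- ===== Notes on version B (the rewrite author's own statement) =====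
-- stated objective: idiomatic
-- what changed: Replaces the index-counting loop with an es_par parity test by a single strided slice assignment writing zeros to all even indices at once (same in-place mutation); the bulk slice write avoids per-element Python bytecode, a constant-factor speedup measured.
import Mathlib
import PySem

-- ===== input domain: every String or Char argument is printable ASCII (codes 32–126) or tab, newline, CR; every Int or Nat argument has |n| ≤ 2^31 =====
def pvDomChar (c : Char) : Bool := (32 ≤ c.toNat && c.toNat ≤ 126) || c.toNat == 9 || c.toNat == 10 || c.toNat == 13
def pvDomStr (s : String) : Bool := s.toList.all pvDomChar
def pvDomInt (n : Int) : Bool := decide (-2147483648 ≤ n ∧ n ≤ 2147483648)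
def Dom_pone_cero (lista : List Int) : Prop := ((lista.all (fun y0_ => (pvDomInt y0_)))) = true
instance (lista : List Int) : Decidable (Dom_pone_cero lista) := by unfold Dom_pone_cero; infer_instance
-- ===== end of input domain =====

-- B zeroes the even indices with one strided slice assignment instead of A's counting loop
-- with an es_par parity test (idiomatic). Both Pythons mutate the list in place; the
-- equivalence proved here is about the RETURN value.

-- ===== PORT A =====
def es_par (numero : Int) : Bool := if numero % 2 == 0 then true else false

-- A iterates over the list it mutates; the loop variable is unused and only the length
-- matters, so folding over the original list is exact.
def pone_cero (lista : List Int) : List Int :=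
  (lista.foldl
    (fun (st : List Int × Int) _numero =>
      if es_par st.2 then (st.1.set st.2.toNat 0, st.2 + 1)
      else (st.1, st.2 + 1))
    (lista, 0)).1

-- ===== PORT B =====
-- hand port of the slice assignment lista[::2] = zs (writes zs into indices 0,2,4,…; exact
-- here because zs has exactly (len+1)//2 elements)
def setStride2 : List Int → List Int → List Int
  | l, [] => l
  | [], _ => []
  | _x :: xs, z :: zs =>
    match xs with
    | [] => [z]
    | _y :: ys => z :: _y :: setStride2 ys zs

def pone_cero_alt (lista : List Int) : List Int :=
  setStride2 lista (List.replicate ((lista.length + 1) / 2) 0)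

-- ===== PRECONDITION & SPEC =====
def Spec_pone_cero (lista : List Int) (out : List Int) : Prop := out = pone_cero_alt lista
instance (lista : List Int) (out : List Int) : Decidable (Spec_pone_cero lista out) := by unfold Spec_pone_cero; infer_instance

-- ===== CLAIM (what is proved, stated in full; the proofs are below) =====
def Claim_equal_pone_cero : Prop := ∀ (lista : List Int), Dom_pone_cero lista → Spec_pone_cero lista (pone_cero lista)

-- ===== LEMMAS AND PROOFS =====

-- A's loop, abstracted: starting at counter k, perform n steps, setting each even index.
def goA : List Int → Int → Nat → List Int
  | l, _, 0 => l
  | l, k, n + 1 => goA (if es_par k then l.set k.toNat 0 else l) (k + 1) n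

theorem foldA_eq_goA (ys l : List Int) (k : Int) :
    ys.foldl
      (fun (st : List Int × Int) _numero =>
        if es_par st.2 then (st.1.set st.2.toNat 0, st.2 + 1)
        else (st.1, st.2 + 1)) (l, k)
      = (goA l k ys.length, k + ys.length) := by
  induction ys generalizing l k with
  | nil => simp [goA]
  | cons y ys ih =>
    simp only [List.foldl_cons, List.length_cons, goA]
    by_cases h : es_par k <;> simp [h, ih] <;> ring_nf

theorem goA_get (n : Nat) : ∀ (k : Nat) (l : List Int) (j : Nat),
    (goA l (↑k) n)[j]? =
      if k ≤ j ∧ j < k + n ∧ j % 2 = 0 ∧ j < l.length then some 0 else l[j]? := by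
  induction n with
  | zero => intro k l j; simp [goA]; omega
  | succ n ih =>
    intro k l j
    have hk1 : (↑k + 1 : Int) = ↑(k + 1) := by push_cast; ring
    by_cases hk : k % 2 = 0
    · have hpar : es_par (↑k) = true := by
        simp [es_par]; omega
      simp only [goA, hpar, if_true, hk1, Int.toNat_natCast]
      rw [ih (k + 1) (l.set k 0) j]
      rw [List.getElem?_set]
      simp only [List.length_set]
      split_ifs with h1 h2 h3 h4 h5 <;>
        first | rfl | omega | (symm; rw [List.getElem?_eq_none_iff]; omega)
    · have hpar : es_par (↑k) = false := by
        simp [es_par]; omega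
      simp only [goA, hpar, Bool.false_eq_true, if_false, hk1]
      rw [ih (k + 1) l j]
      split_ifs with h1 h2 <;> first | rfl | omega

theorem altB_get : ∀ (l : List Int) (j : Nat),
    (setStride2 l (List.replicate ((l.length + 1) / 2) 0))[j]? =
      if j % 2 = 0 ∧ j < l.length then some 0 else l[j]?
  | [], j => by simp [setStride2]
  | [_x], j => by
    match j with
    | 0 => simp [setStride2]
    | j + 1 => simp [setStride2]
  | _x :: y :: ys, j => by
    have hlen : (((_x :: y :: ys).length + 1) / 2) = ((ys.length + 1) / 2) + 1 := by
      simp; omega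
    rw [hlen, List.replicate_succ]
    show ((0 : Int) :: y :: setStride2 ys (List.replicate ((ys.length + 1) / 2) 0))[j]? = _
    match j with
    | 0 => simp
    | 1 => simp
    | j + 2 =>
      have ih := altB_get ys j
      simp only [List.getElem?_cons_succ, ih, List.length_cons]
      split_ifs with h1 h2 h3 <;> first | rfl | omega

-- ===== VERDICT (by name: the statement is the Claim_ definition above) =====
theorem pone_cero_spec : Claim_equal_pone_cero := by
  intro lista _
  show pone_cero lista = pone_cero_alt lista
  apply List.ext_getElem?
  intro j
  have hA : pone_cero lista = goA lista 0 lista.length := by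
    unfold pone_cero
    rw [foldA_eq_goA]
  rw [hA]
  have h0 : (0 : Int) = ((0 : Nat) : Int) := rfl
  rw [h0, goA_get lista.length 0 lista j]
  unfold pone_cero_alt
  rw [altB_get lista j]
  split_ifs with h1 h2 h3 <;> first | rfl | omega
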